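-- pv_equiv track=rewrite | github.com/JaeLee18/Language-Guided-Invariance-Probing-of-Vision-Language-Models | rebuttal_enhanced_perturb_with_fliptypes.py | synonym_based_paraphrases
-- ===== SOURCE A (Python) =====
-- SYNONYM_DICT = {
--     'cat': ['feline', 'kitty'],
--     'dog': ['canine', 'puppy', 'hound'],
--     'person': ['individual', 'human', 'man', 'woman'],
--     'sits': ['rests', 'perches'],
--     'stands': ['stands', 'poses'],
--     'large': ['big', 'huge', 'enormous'],
--     'small': ['little', 'tiny', 'miniature'],
--     'red': ['crimson', 'scarlet'],
--     'blue': ['azure', 'navy'],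
--     'green': ['emerald', 'lime'],
-- }
--
-- def synonym_based_paraphrases(caption: str):
--     """
--     Replace words with synonyms while preserving meaning
--     """
--     paraphrases = []
--     words = caption.lower().split()
--
--     # Try substituting 1-2 words with synonyms
--     for i, word in enumerate(words):
--         if word in SYNONYM_DICT:
--             for synonym in SYNONYM_DICT[word]:
--                 new_words = words.copy()
--                 new_words[i] = synonym
--                 new_caption = ' '.join(new_words).capitalize()
--                 if new_caption != caption:
--                     paraphrases.append(new_caption)
--
--     # Try substituting two words if possible
--     for i, word1 in enumerate(words):
--         if word1 in SYNONYM_DICT: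
--             for j, word2 in enumerate(words[i+1:], i+1):
--                 if word2 in SYNONYM_DICT:
--                     for syn1 in SYNONYM_DICT[word1]:
--                         for syn2 in SYNONYM_DICT[word2]:
--                             new_words = words.copy()
--                             new_words[i] = syn1
--                             new_words[j] = syn2
--                             new_caption = ' '.join(new_words).capitalize()
--                             if new_caption != caption:
--                                 paraphrases.append(new_caption)
--
--     return paraphrases
-- ===== SOURCE B (Python) =====
-- SYNONYM_DICT = {
--     'cat': ['feline', 'kitty'],
--     'dog': ['canine', 'puppy', 'hound'],
--     'person': ['individual', 'human', 'man', 'woman'],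
--     'sits': ['rests', 'perches'],
--     'stands': ['stands', 'poses'],
--     'large': ['big', 'huge', 'enormous'],
--     'small': ['little', 'tiny', 'miniature'],
--     'red': ['crimson', 'scarlet'],
--     'blue': ['azure', 'navy'],
--     'green': ['emerald', 'lime'],
-- }
--
-- def synonym_based_paraphrases(caption: str):
--     """
--     Replace words with synonyms while preserving meaning.
--     Recursive decomposition: no indices and no list mutation/copying —
--     each paraphrase's word list is built by splicing prefix + [synonym] + suffix.
--     """
--     words = caption.lower().split()
--
--     def keep(ws):
--         nc = ' '.join(ws).capitalize()
--         return [nc] if nc != caption else []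
--
--     def singles(pre, rest):
--         # substitute one word somewhere in rest; pre is the untouched prefix
--         if not rest:
--             return []
--         w, t = rest[0], rest[1:]
--         out = []
--         for syn in SYNONYM_DICT.get(w, []):
--             out += keep(pre + [syn] + t)
--         return out + singles(pre + [w], t)
--
--     def second(pre, syns1, mid, rest):
--         # first substitution already chosen (one of syns1, replacing the word
--         # that sat between pre and mid); place the second one somewhere in rest
--         if not rest:
--             return []
--         w2, t = rest[0], rest[1:]
--         out = []
--         syns2 = SYNONYM_DICT.get(w2, [])
--         for s1 in syns1:
--             for s2 in syns2:
--                 out += keep(pre + [s1] + mid + [s2] + t)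
--         return out + second(pre, syns1, mid + [w2], t)
--
--     def doubles(pre, rest):
--         if not rest:
--             return []
--         w, t = rest[0], rest[1:]
--         syns1 = SYNONYM_DICT.get(w, [])
--         here = second(pre, syns1, [], t) if syns1 else []
--         return here + doubles(pre + [w], t)
--
--     return singles([], words) + doubles([], words)
-- ===== Notes on version B (the rewrite author's own statement) =====
-- stated objective: alternative
-- what changed: B replaces A's index-based nested loops, list copies and in-place element assignment by structural recursion over the word list: each paraphrase's word list is built by splicing prefix ++ [synonym] ++ suffix (and prefix ++ [syn1] ++ middle ++ [syn2] ++ suffix), with no enumerate, no indices and no mutation.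
import Mathlib
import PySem

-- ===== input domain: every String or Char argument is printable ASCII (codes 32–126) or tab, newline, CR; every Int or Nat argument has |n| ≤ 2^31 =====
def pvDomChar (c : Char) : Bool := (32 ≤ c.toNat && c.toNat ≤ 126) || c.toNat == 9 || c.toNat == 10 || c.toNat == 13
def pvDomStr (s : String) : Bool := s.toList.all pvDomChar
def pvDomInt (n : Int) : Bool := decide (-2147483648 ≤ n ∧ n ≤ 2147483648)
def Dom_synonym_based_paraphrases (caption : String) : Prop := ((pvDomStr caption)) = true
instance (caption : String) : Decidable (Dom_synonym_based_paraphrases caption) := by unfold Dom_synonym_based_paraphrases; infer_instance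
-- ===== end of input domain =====

-- B replaces A's index loops with structural recursion over the word list: each paraphrase is
-- built by splicing prefix ++ [synonym] ++ suffix, with no indices, copies or in-place sets
-- (objective: alternative decomposition).

-- shared module context: SYNONYM_DICT (dict of distinct string keys, insertion order)
def pvSYN : PySem.Dict (List Char) (List (List Char)) := PySem.Dict.ofList
  [ ("cat".toList, ["feline".toList, "kitty".toList]),
    ("dog".toList, ["canine".toList, "puppy".toList, "hound".toList]),
    ("person".toList, ["individual".toList, "human".toList, "man".toList, "woman".toList]),
    ("sits".toList, ["rests".toList, "perches".toList]),
    ("stands".toList, ["stands".toList, "poses".toList]),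
    ("large".toList, ["big".toList, "huge".toList, "enormous".toList]),
    ("small".toList, ["little".toList, "tiny".toList, "miniature".toList]),
    ("red".toList, ["crimson".toList, "scarlet".toList]),
    ("blue".toList, ["azure".toList, "navy".toList]),
    ("green".toList, ["emerald".toList, "lime".toList]) ]

-- str.capitalize(): first char upper-cased, rest lower-cased — exact on the ASCII domain
def pvCapitalize : List Char → List Char
  | [] => []
  | c :: t => PySem.Chars.upperChar c :: PySem.Chars.lower t

-- ===== PORT A =====
def synonym_based_paraphrases (caption : String) : List String :=
  let words := PySem.Chars.split₀ (PySem.Chars.lower caption.toList)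
  -- first loop: single substitutions (enumerate indices are nonnegative and in range, so .toNat is exact)
  let p1 := (PySem.List.enumerate words).foldl (fun acc iw =>
    match PySem.Dict.get? pvSYN iw.2 with
    | some syns =>
      syns.foldl (fun acc syn =>
        let nw := words.set iw.1.toNat syn
        let nc := pvCapitalize (PySem.Chars.join [' '] nw)
        if nc ≠ caption.toList then acc ++ [String.ofList nc] else acc) acc
    | none => acc) []
  -- second loop: double substitutions, inner enumerate over words[i+1:] with start i+1
  (PySem.List.enumerate words).foldl (fun acc iw =>
    match PySem.Dict.get? pvSYN iw.2 with
    | some syns1 =>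
      (PySem.List.enumerate (PySem.List.slice words (some (iw.1 + 1))) (iw.1 + 1)).foldl (fun acc jw =>
        match PySem.Dict.get? pvSYN jw.2 with
        | some syns2 =>
          syns1.foldl (fun acc s1 => syns2.foldl (fun acc s2 =>
            let nw := (words.set iw.1.toNat s1).set jw.1.toNat s2
            let nc := pvCapitalize (PySem.Chars.join [' '] nw)
            if nc ≠ caption.toList then acc ++ [String.ofList nc] else acc) acc) acc
        | none => acc) acc
    | none => acc) p1

-- ===== PORT B =====
-- keep(ws): join, capitalize, keep as a one-element list iff different from the caption
def pvKeep (cap : List Char) (ws : List (List Char)) : List String :=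
  let nc := pvCapitalize (PySem.Chars.join [' '] ws)
  if nc ≠ cap then [String.ofList nc] else []

-- singles(pre, rest): substitute one word somewhere in rest; pre is the untouched prefix
def pvSinglesB (cap : List Char) (pre : List (List Char)) : List (List Char) → List String
  | [] => []
  | w :: t =>
    ((PySem.Dict.getD pvSYN w []).foldl (fun out syn => out ++ pvKeep cap (pre ++ [syn] ++ t)) [])
      ++ pvSinglesB cap (pre ++ [w]) t

-- second(pre, syns1, mid, rest): first substitution chosen (between pre and mid); place the second in rest
def pvSecondB (cap : List Char) (pre : List (List Char)) (syns1 : List (List Char))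
    (mid : List (List Char)) : List (List Char) → List String
  | [] => []
  | w2 :: t =>
    (syns1.foldl (fun out s1 =>
        (PySem.Dict.getD pvSYN w2 []).foldl (fun out s2 =>
          out ++ pvKeep cap (pre ++ [s1] ++ mid ++ [s2] ++ t)) out) [])
      ++ pvSecondB cap pre syns1 (mid ++ [w2]) t

-- doubles(pre, rest): first substitution somewhere in rest
def pvDoublesB (cap : List Char) (pre : List (List Char)) : List (List Char) → List String
  | [] => []
  | w :: t =>
    (if PySem.Dict.getD pvSYN w [] ≠ [] then pvSecondB cap pre (PySem.Dict.getD pvSYN w []) [] t else [])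
      ++ pvDoublesB cap (pre ++ [w]) t

def synonym_based_paraphrases_alt (caption : String) : List String :=
  let words := PySem.Chars.split₀ (PySem.Chars.lower caption.toList)
  pvSinglesB caption.toList [] words ++ pvDoublesB caption.toList [] words

-- ===== PRECONDITION & SPEC =====
def Spec_synonym_based_paraphrases (caption : String) (out : List String) : Prop := out = synonym_based_paraphrases_alt caption
instance (caption : String) (out : List String) : Decidable (Spec_synonym_based_paraphrases caption out) := by unfold Spec_synonym_based_paraphrases; infer_instance

-- ===== CLAIM (what is proved, stated in full; the proofs are below) =====
def Claim_equal_synonym_based_paraphrases : Prop := ∀ (caption : String), Dom_synonym_based_paraphrases caption → Spec_synonym_based_paraphrases caption (synonym_based_paraphrases caption)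

-- ===== LEMMAS AND PROOFS =====

-- setting the element right after a prefix is splicing
theorem pv_set_splice {α : Type} (pre : List α) (x : α) (t : List α) (s : α) :
    (pre ++ x :: t).set pre.length s = pre ++ s :: t := by
  induction pre with
  | nil => rfl
  | cons p pre ih => simp [ih]

-- A's guarded append body, written as appending pvKeep
theorem pv_if_eq_keep (cap : List Char) (ws : List (List Char)) (acc : List String) :
    (if pvCapitalize (PySem.Chars.join [' '] ws) ≠ cap
       then acc ++ [String.ofList (pvCapitalize (PySem.Chars.join [' '] ws))] else acc)
    = acc ++ pvKeep cap ws := by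
  unfold pvKeep; split_ifs <;> simp_all

-- A's inner single-substitution loop equals B's, started from []
theorem pv_single_inner (cap : List Char) (pre t : List (List Char)) (w : List Char)
    (syns : List (List Char)) (acc : List String) :
    syns.foldl (fun acc syn =>
        if pvCapitalize (PySem.Chars.join [' '] ((pre ++ w :: t).set ((pre.length : Int)).toNat syn)) ≠ cap
          then acc ++ [String.ofList (pvCapitalize (PySem.Chars.join [' '] ((pre ++ w :: t).set ((pre.length : Int)).toNat syn)))]
          else acc) acc
    = acc ++ syns.foldl (fun out syn => out ++ pvKeep cap (pre ++ [syn] ++ t)) [] := by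
  have hb : ∀ (a : List String) (syn : List Char),
      (if pvCapitalize (PySem.Chars.join [' '] ((pre ++ w :: t).set ((pre.length : Int)).toNat syn)) ≠ cap
        then a ++ [String.ofList (pvCapitalize (PySem.Chars.join [' '] ((pre ++ w :: t).set ((pre.length : Int)).toNat syn)))]
        else a)
      = a ++ pvKeep cap (pre ++ [syn] ++ t) := by
    intro a syn
    have hset : (pre ++ w :: t).set ((pre.length : Int)).toNat syn = pre ++ syn :: t := by
      rw [Int.toNat_natCast, pv_set_splice]
    rw [hset]
    simpa using pv_if_eq_keep cap (pre ++ syn :: t) a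
  rw [PySem.List.foldl_congr_mem (g := fun a syn => a ++ pvKeep cap (pre ++ [syn] ++ t))
        (h := fun a x _ => hb a x),
      PySem.List.foldl_congr_mem (l := syns) (init := ([] : List String))
        (f := fun out syn => out ++ pvKeep cap (pre ++ [syn] ++ t))
        (g := fun a syn => a ++ pvKeep cap (pre ++ [syn] ++ t)) (h := fun _ _ _ => rfl),
      PySem.List.foldl_append_eq_flatMap, PySem.List.foldl_append_eq_flatMap]
  simp

-- A's doubly-nested synonym loop equals B's, started from []
theorem pv_pair_inner (cap : List Char) (pre mid t : List (List Char)) (w w2 : List Char)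
    (syns1 syns2 : List (List Char)) (acc : List String) :
    syns1.foldl (fun acc s1 => syns2.foldl (fun acc s2 =>
        if pvCapitalize (PySem.Chars.join [' ']
              (((pre ++ w :: (mid ++ w2 :: t)).set ((pre.length : Int)).toNat s1).set
                ((pre.length : Int) + 1 + (mid.length : Int)).toNat s2)) ≠ cap
          then acc ++ [String.ofList (pvCapitalize (PySem.Chars.join [' ']
              (((pre ++ w :: (mid ++ w2 :: t)).set ((pre.length : Int)).toNat s1).set
                ((pre.length : Int) + 1 + (mid.length : Int)).toNat s2)))]
          else acc) acc) acc
    = acc ++ syns1.foldl (fun out s1 => syns2.foldl (fun out s2 =>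
        out ++ pvKeep cap (pre ++ [s1] ++ mid ++ [s2] ++ t)) out) [] := by
  have hset : ∀ s1 s2, ((pre ++ w :: (mid ++ w2 :: t)).set ((pre.length : Int)).toNat s1).set
      ((pre.length : Int) + 1 + (mid.length : Int)).toNat s2
      = pre ++ s1 :: (mid ++ s2 :: t) := by
    intro s1 s2
    rw [Int.toNat_natCast, pv_set_splice]
    have h2 : ((pre.length : Int) + 1 + (mid.length : Int)).toNat = (pre ++ s1 :: mid).length := by
      simp; omega
    have hre : pre ++ s1 :: (mid ++ w2 :: t) = (pre ++ s1 :: mid) ++ w2 :: t := by simp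
    rw [h2, hre, pv_set_splice]; simp
  have hinner : ∀ (a : List String) (s1 : List Char),
      syns2.foldl (fun acc s2 =>
        if pvCapitalize (PySem.Chars.join [' ']
              (((pre ++ w :: (mid ++ w2 :: t)).set ((pre.length : Int)).toNat s1).set
                ((pre.length : Int) + 1 + (mid.length : Int)).toNat s2)) ≠ cap
          then acc ++ [String.ofList (pvCapitalize (PySem.Chars.join [' ']
              (((pre ++ w :: (mid ++ w2 :: t)).set ((pre.length : Int)).toNat s1).set
                ((pre.length : Int) + 1 + (mid.length : Int)).toNat s2)))]
          else acc) a
      = a ++ syns2.flatMap (fun s2 => pvKeep cap (pre ++ [s1] ++ mid ++ [s2] ++ t)) := by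
    intro a s1
    rw [PySem.List.foldl_congr_mem
        (g := fun acc s2 => acc ++ pvKeep cap (pre ++ [s1] ++ mid ++ [s2] ++ t))
        (h := by
          intro acc s2 _
          rw [hset s1 s2]
          simpa using pv_if_eq_keep cap (pre ++ s1 :: (mid ++ s2 :: t)) acc),
      PySem.List.foldl_append_eq_flatMap]
  rw [PySem.List.foldl_congr_mem
      (g := fun acc s1 => acc ++ syns2.flatMap (fun s2 => pvKeep cap (pre ++ [s1] ++ mid ++ [s2] ++ t)))
      (h := fun acc s1 _ => hinner acc s1),
    PySem.List.foldl_append_eq_flatMap]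
  congr 1
  rw [PySem.List.foldl_congr_mem (l := syns1) (init := ([] : List String))
      (f := fun out s1 => syns2.foldl (fun out s2 => out ++ pvKeep cap (pre ++ [s1] ++ mid ++ [s2] ++ t)) out)
      (g := fun out s1 => out ++ syns2.flatMap (fun s2 => pvKeep cap (pre ++ [s1] ++ mid ++ [s2] ++ t)))
      (h := by intro out s1 _; exact PySem.List.foldl_append_eq_flatMap _ _ _),
    PySem.List.foldl_append_eq_flatMap]
  simp

-- getD is get? with a default
theorem pv_getD_eq (w : List Char) :
    PySem.Dict.getD pvSYN w [] = (PySem.Dict.get? pvSYN w).getD [] :=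
  PySem.Dict.getD_eq_get?_getD pvSYN w []

-- second(pre, [], mid, rest) yields nothing
theorem pvSecondB_nil (cap : List Char) (pre : List (List Char)) :
    ∀ (rest mid : List (List Char)), pvSecondB cap pre [] mid rest = [] := by
  intro rest
  induction rest with
  | nil => intro mid; rfl
  | cons w2 t ih => intro mid; simp [pvSecondB, ih]

-- A's second inner enumerate loop follows B's second(pre, syns1, mid, rest)
theorem pv_second_eq (cap : List Char) (pre : List (List Char)) (w : List Char)
    (syns1 : List (List Char)) :
    ∀ (rest mid : List (List Char)) (acc : List String),
      (PySem.List.enumerate rest ((pre.length : Int) + 1 + (mid.length : Int))).foldl (fun acc jw =>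
        match PySem.Dict.get? pvSYN jw.2 with
        | some syns2 =>
          syns1.foldl (fun acc s1 => syns2.foldl (fun acc s2 =>
            if pvCapitalize (PySem.Chars.join [' ']
                  (((pre ++ w :: (mid ++ rest)).set ((pre.length : Int)).toNat s1).set jw.1.toNat s2)) ≠ cap
              then acc ++ [String.ofList (pvCapitalize (PySem.Chars.join [' ']
                  (((pre ++ w :: (mid ++ rest)).set ((pre.length : Int)).toNat s1).set jw.1.toNat s2)))]
              else acc) acc) acc
        | none => acc) acc
      = acc ++ pvSecondB cap pre syns1 mid rest := by
  intro rest
  induction rest with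
  | nil => intro mid acc; simp [PySem.List.enumerate_nil, pvSecondB]
  | cons w2 t ih =>
    intro mid acc
    rw [PySem.List.enumerate_cons, List.foldl_cons]
    have hmid : (pre.length : Int) + 1 + (mid.length : Int) + 1
        = (pre.length : Int) + 1 + (((mid ++ [w2]).length : Int)) := by
      simp [List.length_append]; omega
    have hW : pre ++ w :: (mid ++ w2 :: t) = pre ++ w :: ((mid ++ [w2]) ++ t) := by simp
    cases h : PySem.Dict.get? pvSYN w2 with
    | none =>
      have hd : PySem.Dict.getD pvSYN w2 [] = [] := by rw [pv_getD_eq, h]; rfl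
      simp only [h]
      rw [hW, hmid, ih (mid ++ [w2]) acc]
      simp [pvSecondB, hd]
    | some syns2 =>
      have hd : PySem.Dict.getD pvSYN w2 [] = syns2 := by rw [pv_getD_eq, h]; rfl
      simp only [h]
      rw [pv_pair_inner cap pre mid t w w2 syns1 syns2 acc]
      rw [hW, hmid, ih (mid ++ [w2])]
      simp [pvSecondB, hd, List.append_assoc]

-- A's singles loop follows B's singles(pre, rest)
theorem pv_singles_eq (cap : List Char) :
    ∀ (rest pre : List (List Char)) (acc : List String),
      (PySem.List.enumerate rest (pre.length : Int)).foldl (fun acc iw =>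
        match PySem.Dict.get? pvSYN iw.2 with
        | some syns =>
          syns.foldl (fun acc syn =>
            if pvCapitalize (PySem.Chars.join [' '] ((pre ++ rest).set iw.1.toNat syn)) ≠ cap
              then acc ++ [String.ofList (pvCapitalize (PySem.Chars.join [' '] ((pre ++ rest).set iw.1.toNat syn)))]
              else acc) acc
        | none => acc) acc
      = acc ++ pvSinglesB cap pre rest := by
  intro rest
  induction rest with
  | nil => intro pre acc; simp [PySem.List.enumerate_nil, pvSinglesB]
  | cons w t ih =>
    intro pre acc
    rw [PySem.List.enumerate_cons, List.foldl_cons]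
    have hlen : (pre.length : Int) + 1 = (((pre ++ [w]).length : Nat) : Int) := by
      simp [List.length_append]
    have hW : pre ++ w :: t = (pre ++ [w]) ++ t := by simp
    cases h : PySem.Dict.get? pvSYN w with
    | none =>
      have hd : PySem.Dict.getD pvSYN w [] = [] := by rw [pv_getD_eq, h]; rfl
      simp only [h]
      rw [hW, hlen, ih (pre ++ [w]) acc]
      simp [pvSinglesB, hd]
    | some syns =>
      have hd : PySem.Dict.getD pvSYN w [] = syns := by rw [pv_getD_eq, h]; rfl
      simp only [h]
      rw [pv_single_inner cap pre t w syns acc]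
      rw [hW, hlen, ih (pre ++ [w])]
      simp [pvSinglesB, hd, List.append_assoc]

-- A's doubles loop follows B's doubles(pre, rest)
theorem pv_doubles_eq (cap : List Char) :
    ∀ (rest pre : List (List Char)) (acc : List String),
      (PySem.List.enumerate rest (pre.length : Int)).foldl (fun acc iw =>
        match PySem.Dict.get? pvSYN iw.2 with
        | some syns1 =>
          (PySem.List.enumerate (PySem.List.slice (pre ++ rest) (some (iw.1 + 1))) (iw.1 + 1)).foldl
            (fun acc jw =>
            match PySem.Dict.get? pvSYN jw.2 with
            | some syns2 =>
              syns1.foldl (fun acc s1 => syns2.foldl (fun acc s2 =>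
                if pvCapitalize (PySem.Chars.join [' ']
                      (((pre ++ rest).set iw.1.toNat s1).set jw.1.toNat s2)) ≠ cap
                  then acc ++ [String.ofList (pvCapitalize (PySem.Chars.join [' ']
                      (((pre ++ rest).set iw.1.toNat s1).set jw.1.toNat s2)))]
                  else acc) acc) acc
            | none => acc) acc
        | none => acc) acc
      = acc ++ pvDoublesB cap pre rest := by
  intro rest
  induction rest with
  | nil => intro pre acc; simp [PySem.List.enumerate_nil, pvDoublesB]
  | cons w t ih =>
    intro pre acc
    rw [PySem.List.enumerate_cons, List.foldl_cons]
    have hlen : (pre.length : Int) + 1 = (((pre ++ [w]).length : Nat) : Int) := by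
      simp [List.length_append]
    have hW : pre ++ w :: t = (pre ++ [w]) ++ t := by simp
    have hslice : PySem.List.slice (pre ++ w :: t) (some ((pre.length : Int) + 1)) = t := by
      rw [PySem.List.slice_from _ (by positivity)]
      have h1 : ((pre.length : Int) + 1).toNat = pre.length + 1 := by omega
      rw [h1, hW, List.drop_append_of_le_length (by simp)]
      simp
    cases h : PySem.Dict.get? pvSYN w with
    | none =>
      have hd : PySem.Dict.getD pvSYN w [] = [] := by rw [pv_getD_eq, h]; rfl
      simp only [h]
      rw [hW, hlen, ih (pre ++ [w]) acc]
      simp [pvDoublesB, hd]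
    | some syns1 =>
      have hd : PySem.Dict.getD pvSYN w [] = syns1 := by rw [pv_getD_eq, h]; rfl
      simp only [h, hslice]
      have hsec := pv_second_eq cap pre w syns1 t [] acc
      simp only [List.length_nil, Int.natCast_zero, Int.add_zero, List.nil_append] at hsec
      rw [hsec]
      rw [hW, hlen, ih (pre ++ [w])]
      by_cases hne : syns1 = [] <;>
        simp [pvDoublesB, hd, hne, pvSecondB_nil, List.append_assoc]

-- ===== VERDICT (by name: the statement is the Claim_ definition above) =====
theorem synonym_based_paraphrases_spec : Claim_equal_synonym_based_paraphrases := by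
  intro caption _hdom
  unfold Spec_synonym_based_paraphrases
  simp only [synonym_based_paraphrases, synonym_based_paraphrases_alt]
  have h1 := pv_singles_eq caption.toList (PySem.Chars.split₀ (PySem.Chars.lower caption.toList)) [] []
  have h2 := pv_doubles_eq caption.toList (PySem.Chars.split₀ (PySem.Chars.lower caption.toList)) []
      (pvSinglesB caption.toList [] (PySem.Chars.split₀ (PySem.Chars.lower caption.toList)))
  simp only [List.length_nil, Int.natCast_zero, List.nil_append] at h1 h2
  rw [h1, h2]
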